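-- pv_equiv track=rewrite | github.com/Silung/tmh | build_pairwise_evalset.py | titles_sample_for_llm
-- ===== SOURCE A (Python) =====
-- def titles_sample_for_llm(
--     titles_full: list[str],
--     max_count: int,
--     max_total_chars: int,
-- ) -> list[str]:
--     """
--     按顺序选取 caption，拼接为「- 行1\\n- 行2」形式时总长度不超过 max_total_chars。
--     max_count<=0 表示条数不设上限，仅受字符数约束。
--     """
--     if not titles_full or max_total_chars <= 0:
--         return []
--     out: list[str] = []
--     for t in titles_full:
--         if max_count > 0 and len(out) >= max_count:
--             break
--         candidate = out + [t]
--         block = "\n".join(f"- {x}" for x in candidate)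
--         if len(block) <= max_total_chars:
--             out.append(t)
--             continue
--         if not out:
--             head = max_total_chars - 2
--             if head < 1:
--                 break
--             suffix = "…" if len(t) > head else ""
--             out.append(t[:head] + suffix)
--         break
--     return out
-- ===== SOURCE B (Python) =====
-- from bisect import bisect_right
-- from itertools import accumulate
--
--
-- def titles_sample_for_llm(
--     titles_full: list[str],
--     max_count: int,
--     max_total_chars: int,
-- ) -> list[str]:
--     """Same selection via a cumulative-length table and one bisect: the block
--     for the first k titles has length sum(len)+3k-1, strictly increasing in k,
--     so the answer is the longest prefix whose cumulative length fits."""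
--     if not titles_full or max_total_chars <= 0:
--         return []
--     cums = list(accumulate(len(t) + 3 for t in titles_full))
--     # block(k) = cums[k-1] - 1, so block(k) <= max_total_chars  <=>  cums[k-1] <= max_total_chars + 1
--     k = bisect_right(cums, max_total_chars + 1)
--     if max_count > 0:
--         k = min(k, max_count)
--     if k > 0:
--         return titles_full[:k]
--     # first title alone overflows: truncate it
--     head = max_total_chars - 2
--     if head < 1:
--         return []
--     t0 = titles_full[0]
--     return [t0[:head] + ("…" if len(t0) > head else "")]
-- ===== Notes on version B (the rewrite author's own statement) =====
-- stated objective: faster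
-- what changed: Replaces A's greedy loop that re-joins the whole '- ...' block on every iteration with a one-pass cumulative-length table (len(t)+3 each) plus a single bisect to find the longest fitting prefix, since the block length is strictly increasing in the prefix length.
import Mathlib
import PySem

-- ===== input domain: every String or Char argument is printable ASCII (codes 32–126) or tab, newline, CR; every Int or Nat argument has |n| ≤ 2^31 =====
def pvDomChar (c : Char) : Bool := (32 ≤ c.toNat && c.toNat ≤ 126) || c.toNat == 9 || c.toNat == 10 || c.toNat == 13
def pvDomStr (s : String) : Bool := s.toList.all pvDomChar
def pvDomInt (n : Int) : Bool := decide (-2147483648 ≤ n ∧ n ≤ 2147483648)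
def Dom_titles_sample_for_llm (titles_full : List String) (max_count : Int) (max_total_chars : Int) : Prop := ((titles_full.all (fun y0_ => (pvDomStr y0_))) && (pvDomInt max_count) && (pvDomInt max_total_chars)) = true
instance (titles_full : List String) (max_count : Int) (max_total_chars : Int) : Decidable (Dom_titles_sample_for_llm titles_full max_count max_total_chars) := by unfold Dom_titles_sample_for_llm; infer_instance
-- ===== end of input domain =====

-- B replaces A's rebuild-the-joined-block-each-iteration greedy loop by a cumulative-length
-- table plus one bisect (the block for k titles has length sum(len)+3k-1, strictly increasing).

-- ===== PORT A =====
-- string work is ported on code points via PySem.Chars (exact for str: len, join, slice, +)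
def pvA_block (candidate : List String) : List Char :=
  PySem.Chars.join ['\n'] (candidate.map (fun x => '-' :: ' ' :: x.toList))

def pvA_loop (mc mtc : Int) : List String → List String → List String
  | out, [] => out
  | out, t :: rest =>
    if 0 < mc ∧ mc ≤ (out.length : Int) then out
    else
      let candidate := out ++ [t]
      if PySem.Chars.len (pvA_block candidate) ≤ mtc then
        pvA_loop mc mtc candidate rest
      else if out.isEmpty then
        let head := mtc - 2
        if head < 1 then out
        else
          let suffix : List Char := if head < PySem.Chars.len t.toList then ['…'] else []
          out ++ [String.ofList (PySem.Chars.slice t.toList none (some head) ++ suffix)]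
      else out

def titles_sample_for_llm (titles_full : List String) (max_count : Int) (max_total_chars : Int) : List String :=
  if titles_full.isEmpty ∨ max_total_chars ≤ 0 then []
  else pvA_loop max_count max_total_chars [] titles_full

-- ===== PORT B =====
-- itertools.accumulate
def pvB_accum (acc : Int) : List Int → List Int
  | [] => []
  | x :: xs => (acc + x) :: pvB_accum (acc + x) xs

def titles_sample_for_llm_alt (titles_full : List String) (max_count : Int) (max_total_chars : Int) : List String :=
  if titles_full.isEmpty ∨ max_total_chars ≤ 0 then []
  else
    let cums := pvB_accum 0 (titles_full.map (fun t => PySem.Chars.len t.toList + 3))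
    let k0 : Int := (PySem.List.bisectRight cums (max_total_chars + 1) : Int)
    let k : Int := if 0 < max_count then min k0 max_count else k0
    if 0 < k then PySem.List.slice titles_full none (some k)
    else
      let head := max_total_chars - 2
      if head < 1 then []
      else
        match titles_full with
        | [] => []   -- unreachable: the top guard has rejected the empty list
        | t0 :: _ =>
          let suffix : List Char := if head < PySem.Chars.len t0.toList then ['…'] else []
          [String.ofList (PySem.Chars.slice t0.toList none (some head) ++ suffix)]

-- ===== PRECONDITION & SPEC =====
def Spec_titles_sample_for_llm (titles_full : List String) (max_count : Int) (max_total_chars : Int) (out : List String) : Prop := out = titles_sample_for_llm_alt titles_full max_count max_total_chars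
instance (titles_full : List String) (max_count : Int) (max_total_chars : Int) (out : List String) : Decidable (Spec_titles_sample_for_llm titles_full max_count max_total_chars out) := by unfold Spec_titles_sample_for_llm; infer_instance

-- ===== CLAIM (what is proved, stated in full; the proofs are below) =====
def Claim_equal_titles_sample_for_llm : Prop := ∀ (titles_full : List String) (max_count : Int) (max_total_chars : Int), Dom_titles_sample_for_llm titles_full max_count max_total_chars → Spec_titles_sample_for_llm titles_full max_count max_total_chars (titles_sample_for_llm titles_full max_count max_total_chars)

-- ===== LEMMAS AND PROOFS =====

-- per-title weight (= len(t) + 3)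
def pvF (t : String) : Int := PySem.Chars.len t.toList + 3

-- how many further titles the greedy loop still takes, given running weight acc
def pvFitK (q : Int) : Int → List Int → Nat
  | _, [] => 0
  | acc, x :: xs => if acc + x ≤ q then pvFitK q (acc + x) xs + 1 else 0


theorem pvA_block_len (c : List String) (hc : c ≠ []) :
    PySem.Chars.len (pvA_block c) = (c.map pvF).sum - 1 := by
  induction c with
  | nil => simp at hc
  | cons t rest ih =>
    cases rest with
    | nil =>
      simp [pvA_block, PySem.Chars.join_singleton, PySem.Chars.len_eq, pvF]
      omega
    | cons u rest2 =>
      have ih' := ih (by simp)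
      simp only [pvA_block, List.map_cons, PySem.Chars.join_cons_cons, PySem.Chars.len_eq] at ih' ⊢
      simp only [List.length_append, List.length_cons, List.sum_cons, pvF, PySem.Chars.len_eq] at ih' ⊢
      push_cast at ih' ⊢
      rw [ih']
      simp only [List.length_nil]
      omega

theorem pvB_accum_gt (acc : Int) (ls : List Int) (hpos : ∀ x ∈ ls, 0 < x) :
    ∀ y ∈ pvB_accum acc ls, acc < y := by
  induction ls generalizing acc with
  | nil => simp [pvB_accum]
  | cons x xs ih =>
    intro y hy
    simp only [pvB_accum, List.mem_cons] at hy
    have hx : 0 < x := hpos x (by simp)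
    rcases hy with rfl | hy
    · omega
    · have := ih (acc + x) (fun z hz => hpos z (by simp [hz])) y hy
      omega

theorem pvB_accum_length (acc : Int) (ls : List Int) :
    (pvB_accum acc ls).length = ls.length := by
  induction ls generalizing acc with
  | nil => rfl
  | cons x xs ih => simp [pvB_accum, ih]

theorem pvB_accum_pairwise (acc : Int) (ls : List Int) (hpos : ∀ x ∈ ls, 0 < x) :
    (pvB_accum acc ls).Pairwise (· ≤ ·) := by
  induction ls generalizing acc with
  | nil => simp [pvB_accum]
  | cons x xs ih =>
    have hrest : ∀ z ∈ xs, 0 < z := fun z hz => hpos z (by simp [hz])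
    refine List.Pairwise.cons ?_ (ih (acc + x) hrest)
    intro y hy
    exact le_of_lt (pvB_accum_gt (acc + x) xs hrest y hy)

theorem pvFitK_split (q acc : Int) (ls : List Int) (hpos : ∀ x ∈ ls, 0 < x) :
    pvFitK q acc ls ≤ ls.length ∧
    (∀ j (hj : j < ls.length), j < pvFitK q acc ls → (pvB_accum acc ls)[j]'(by rw [pvB_accum_length]; exact hj) ≤ q) ∧
    (∀ j (hj : j < ls.length), pvFitK q acc ls ≤ j → q < (pvB_accum acc ls)[j]'(by rw [pvB_accum_length]; exact hj)) := by
  induction ls generalizing acc with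
  | nil => simp [pvFitK]
  | cons x xs ih =>
    have hrest : ∀ z ∈ xs, 0 < z := fun z hz => hpos z (by simp [hz])
    obtain ⟨h1, h2, h3⟩ := ih (acc + x) hrest
    by_cases hle : acc + x ≤ q
    · refine ⟨?_, ?_, ?_⟩
      · simp [pvFitK, hle]; omega
      · intro j hj hjk
        cases j with
        | zero => simpa [pvB_accum] using hle
        | succ j =>
          simp only [pvFitK, if_pos hle] at hjk
          exact h2 j (by simpa using hj) (by omega)
      · intro j hj hjk
        cases j with
        | zero => simp [pvFitK, hle] at hjk
        | succ j =>
          simp only [pvFitK, if_pos hle] at hjk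
          exact h3 j (by simpa using hj) (by omega)
    · refine ⟨by simp [pvFitK, hle], ?_, ?_⟩
      · intro j hj hjk
        simp [pvFitK, hle] at hjk
      · intro j hj _
        cases j with
        | zero => simpa [pvB_accum] using lt_of_not_ge hle
        | succ j =>
          have : acc + x ≤ (pvB_accum (acc + x) xs)[j]'(by rw [pvB_accum_length]; simpa using hj) := by
            rcases Nat.lt_or_ge j (pvFitK q (acc+x) xs) with h | h
            · exact le_trans (le_of_lt (by
                exact pvB_accum_gt (acc+x) xs hrest _ (List.getElem_mem _))) (le_refl _) |>.trans (le_refl _)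
            · exact le_of_lt (pvB_accum_gt (acc+x) xs hrest _ (List.getElem_mem _))
          simp only [pvB_accum, List.getElem_cons_succ]
          calc q < acc + x := lt_of_not_ge hle
            _ ≤ _ := this

theorem pvBisect_eq_fitK (q acc : Int) (ls : List Int) (hpos : ∀ x ∈ ls, 0 < x) :
    PySem.List.bisectRight (pvB_accum acc ls) q = pvFitK q acc ls := by
  obtain ⟨hm1, hm2, hm3⟩ := pvFitK_split q acc ls hpos
  obtain ⟨hr1, hr2, hr3⟩ := PySem.List.bisectRight_spec (pvB_accum acc ls) q (pvB_accum_pairwise acc ls hpos)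
  set r := PySem.List.bisectRight (pvB_accum acc ls) q with hrdef
  set m := pvFitK q acc ls with hmdef
  rw [pvB_accum_length] at hr1
  by_contra hne
  rcases Nat.lt_or_ge r m with h | h
  · have hrlen : r < ls.length := lt_of_lt_of_le h hm1
    have h1 := hm2 r hrlen h
    have h2 := hr3 r (by rw [pvB_accum_length]; exact hrlen) (le_refl r)
    omega
  · have hlt : m < r := lt_of_le_of_ne h (Ne.symm hne)
    have hmlen : m < ls.length := lt_of_lt_of_le hlt hr1
    have h1 := hr2 m (by rw [pvB_accum_length]; exact hmlen) hlt
    have h2 := hm3 m hmlen (le_refl m)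
    omega


theorem pvA_loop_char (mc mtc : Int) (rest : List String) : ∀ pre, pre ≠ [] →
    (pre.map pvF).sum - 1 ≤ mtc →
    pvA_loop mc mtc pre rest =
      pre ++ rest.take (if 0 < mc then min (pvFitK (mtc + 1) ((pre.map pvF).sum) (rest.map pvF)) (mc - pre.length).toNat
                        else pvFitK (mtc + 1) ((pre.map pvF).sum) (rest.map pvF)) := by
  induction rest with
  | nil => intro pre _ _; simp [pvA_loop, pvFitK]
  | cons t rest ih =>
    intro pre hpre hfit
    simp only [pvA_loop]
    by_cases hcap : 0 < mc ∧ mc ≤ (pre.length : Int)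
    · rw [if_pos hcap]
      have h0 : (mc - (pre.length:Int)).toNat = 0 := by omega
      simp [hcap.1, h0]
    · rw [if_neg hcap]
      have hblock : PySem.Chars.len (pvA_block (pre ++ [t])) = (pre.map pvF).sum + pvF t - 1 := by
        rw [pvA_block_len _ (by simp)]; simp
      by_cases hfits : (pre.map pvF).sum + pvF t ≤ mtc + 1
      · rw [if_pos (by rw [hblock]; omega)]
        rw [ih (pre ++ [t]) (by simp) (by simp; omega)]
        simp only [List.map_append, List.map_cons, List.map_nil, List.sum_append, List.sum_cons,
          List.sum_nil, add_zero, List.length_append, List.length_cons, List.length_nil, List.append_assoc,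
          List.cons_append, List.nil_append]
        congr 1
        have hstep : pvFitK (mtc + 1) ((pre.map pvF).sum) (pvF t :: rest.map pvF)
            = pvFitK (mtc + 1) ((pre.map pvF).sum + pvF t) (rest.map pvF) + 1 := by
          simp [pvFitK, hfits]
        by_cases hmc : 0 < mc
        · rw [if_pos hmc, if_pos hmc, hstep]
          have hlt : (pre.length : Int) < mc := by
            rcases not_and_or.mp hcap with h | h
            · exact absurd hmc h
            · omega
          rw [List.take_cons (by omega)]
          congr 2
          omega
        · rw [if_neg hmc, if_neg hmc, hstep, List.take_succ_cons]
      · rw [if_neg (by rw [hblock]; omega)]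
        have : pre.isEmpty = false := by simpa [List.isEmpty_iff] using hpre
        rw [this]
        simp only [Bool.false_eq_true, if_false]
        have hz : pvFitK (mtc + 1) ((pre.map pvF).sum) (pvF t :: rest.map pvF) = 0 := by
          simp [pvFitK, hfits]
        simp only [List.map_cons, hz]
        simp


theorem pvMain (titles_full : List String) (mc mtc : Int) :
    titles_sample_for_llm titles_full mc mtc = titles_sample_for_llm_alt titles_full mc mtc := by
  cases titles_full with
  | nil => simp [titles_sample_for_llm, titles_sample_for_llm_alt]
  | cons t rest =>
    by_cases hpos : mtc ≤ 0
    · simp [titles_sample_for_llm, titles_sample_for_llm_alt, hpos]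
    · simp only [titles_sample_for_llm, titles_sample_for_llm_alt, List.isEmpty_cons,
        Bool.false_eq_true, false_or, if_neg hpos]
      rw [show (fun (s : String) => PySem.Chars.len s.toList + 3) = pvF from rfl]
      have hposF : ∀ x ∈ (t :: rest).map pvF, 0 < x := by
        intro x hx
        simp only [List.mem_map] at hx
        obtain ⟨s, _, rfl⟩ := hx
        simp [pvF, PySem.Chars.len_eq]
        omega
      rw [pvBisect_eq_fitK _ 0 _ hposF]
      simp only [pvA_loop, List.nil_append]
      rw [if_neg (by rintro ⟨h1, h2⟩; simp at h2; omega)]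
      have hblock : PySem.Chars.len (pvA_block [t]) = pvF t - 1 := by
        rw [pvA_block_len [t] (by simp)]; simp
      set q := mtc + 1 with hq
      set n := pvFitK q (pvF t) (rest.map pvF) with hn
      by_cases hfit : pvF t ≤ q
      · rw [if_pos (by rw [hblock]; omega)]
        rw [pvA_loop_char mc mtc rest [t] (by simp) (by simp only [List.map_cons, List.map_nil, List.sum_cons, List.sum_nil, add_zero]; omega)]
        have hk0 : pvFitK q 0 ((t :: rest).map pvF) = n + 1 := by
          simp only [List.map_cons, pvFitK, zero_add, if_pos hfit, hn]
        rw [hk0]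
        simp only [List.map_cons, List.map_nil, List.sum_cons, List.sum_nil, add_zero,
          List.length_cons, List.length_nil, zero_add, Nat.cast_one]
        by_cases hmc : 0 < mc
        · rw [if_pos hmc, if_pos hmc]
          rw [if_pos (show (0:Int) < min (↑(n+1)) mc by omega)]
          rw [PySem.List.slice_to _ (by omega)]
          rw [List.take_cons (by omega)]
          simp only [List.singleton_append]
          congr 2
          rw [show pvFitK (mtc + 1) (pvF t) (List.map pvF rest) = n from rfl]
          omega
        · rw [if_neg hmc, if_neg hmc]
          rw [if_pos (show (0:Int) < ((n+1 : Nat) : Int) by omega)]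
          rw [PySem.List.slice_to _ (by omega)]
          rw [List.take_cons (by omega)]
          simp only [List.singleton_append, Int.toNat_natCast, Nat.add_sub_cancel]
          rw [show pvFitK (mtc + 1) (pvF t) (List.map pvF rest) = n from rfl]
      · rw [if_neg (by rw [hblock]; omega)]
        have hk0 : pvFitK q 0 ((t :: rest).map pvF) = 0 := by
          simp only [List.map_cons, pvFitK, zero_add, if_neg hfit]
        rw [hk0]
        have hk : ¬ (0 < (if 0 < mc then min ((0:Nat) : Int) mc else ((0:Nat) : Int))) := by
          by_cases hmc : 0 < mc <;> simp [hmc] 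
        rw [if_neg hk]
        simp

-- ===== VERDICT (by name: the statement is the Claim_ definition above) =====
theorem titles_sample_for_llm_spec : Claim_equal_titles_sample_for_llm := by
  intro titles_full max_count max_total_chars _
  unfold Spec_titles_sample_for_llm
  exact pvMain titles_full max_count max_total_chars
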